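-- pv_equiv track=rewrite | github.com/juneth098/VektorConverter | scripts/vcd2vec.py | build_state_at_times
-- ===== SOURCE A (Python) =====
-- def build_state_at_times(symbols, timed_changes, interval):
--     all_times = sorted(timed_changes.keys())
--     max_time = max(all_times)
--     target_times = [n * interval for n in range(1, max_time // interval + 1)]
--     state = {sym: "X" for sym, _ in symbols}
--     vec_rows = []
--
--     changes_iter = iter(all_times)
--     event_time = next(changes_iter, None)
--
--     for t in target_times:
--         while event_time is not None and event_time <= t:
--             for sym, val in timed_changes.get(event_time, []):
--                 state[sym] = val
--             event_time = next(changes_iter, None)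
--         row = "".join(state[sym] for sym, _ in symbols)
--         vec_rows.append((t, row))
--
--     return vec_rows
-- ===== SOURCE B (Python) =====
-- def build_state_at_times(symbols, timed_changes, interval):
--     all_times = sorted(timed_changes.keys())
--     max_time = max(all_times)
--     vec_rows = []
--     for n in range(1, max_time // interval + 1):
--         t = n * interval
--         state = {sym: "X" for sym, _ in symbols}
--         for et in all_times:
--             if et > t:
--                 break
--             for sym, val in timed_changes.get(et, []):
--                 state[sym] = val
--         vec_rows.append((t, "".join(state[sym] for sym, _ in symbols)))
--     return vec_rows
-- ===== Notes on version B (the rewrite author's own statement) =====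
-- stated objective: simpler
-- what changed: A threads one persistent state dict and a shared event iterator across the target times (an interleaved merge-sweep); B computes each row independently, rebuilding a fresh all-'X' state and rescanning the sorted event times up to the target (break at the first later event), so no state or iterator survives between rows.
import Mathlib
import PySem

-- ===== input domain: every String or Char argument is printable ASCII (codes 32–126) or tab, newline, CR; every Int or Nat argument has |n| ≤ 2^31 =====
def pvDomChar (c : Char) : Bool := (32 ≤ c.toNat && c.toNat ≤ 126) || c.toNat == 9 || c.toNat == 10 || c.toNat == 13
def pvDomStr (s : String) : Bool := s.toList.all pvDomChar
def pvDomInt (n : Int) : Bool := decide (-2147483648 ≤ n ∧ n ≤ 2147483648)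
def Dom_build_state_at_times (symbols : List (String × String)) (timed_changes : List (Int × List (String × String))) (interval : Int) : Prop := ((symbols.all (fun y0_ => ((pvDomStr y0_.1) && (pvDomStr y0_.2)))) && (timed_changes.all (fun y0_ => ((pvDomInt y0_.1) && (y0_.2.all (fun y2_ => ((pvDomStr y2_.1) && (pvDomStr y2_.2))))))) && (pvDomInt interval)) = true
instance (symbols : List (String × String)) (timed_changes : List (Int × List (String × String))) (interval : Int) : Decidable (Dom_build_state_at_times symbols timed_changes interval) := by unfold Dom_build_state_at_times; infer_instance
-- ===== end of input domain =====

-- B replaces A's persistent state + shared event iterator swept across the targets by an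
-- independent per-target recomputation (fresh all-'X' state, rescan of the sorted events
-- up to the target); simpler (stateless rows), not faster.

-- ===== PORT A =====
-- apply timed_changes.get(event_time, []) to the state dict ('for sym, val in …: state[sym] = val')
def pvApply (tc : PySem.Dict Int (List (String × String))) (st : PySem.Dict String String) (e : Int) : PySem.Dict String String :=
  (tc.getD e []).foldl (fun s p => s.insert p.1 p.2) st

-- A's inner 'while event_time is not None and event_time <= t' over the iterator's remaining times
def pvConsume (tc : PySem.Dict Int (List (String × String))) (t : Int) :
    PySem.Dict String String → List Int → PySem.Dict String String × List Int
  | st, [] => (st, [])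
  | st, e :: rest => if e ≤ t then pvConsume tc t (pvApply tc st e) rest else (st, e :: rest)

-- row = "".join(state[sym] for sym, _ in symbols); every sym of symbols is initialised in state,
-- so state[sym] never raises and getD with any default is exact
def pvRow (symbols : List (String × String)) (st : PySem.Dict String String) : String :=
  PySem.Str.join "" (symbols.map (fun p => st.getD p.1 "X"))

-- A's 'for t in target_times' loop, threading state and the iterator's remaining times
def pvALoop (symbols : List (String × String)) (tc : PySem.Dict Int (List (String × String))) :
    List Int → PySem.Dict String String → List Int → List (Int × String)
  | [], _, _ => []
  | t :: ts, st, rem =>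
    let p := pvConsume tc t st rem
    (t, pvRow symbols p.1) :: pvALoop symbols tc ts p.1 p.2

def build_state_at_times (symbols : List (String × String)) (timed_changes : List (Int × List (String × String))) (interval : Int) : List (Int × String) :=
  let d := PySem.Dict.ofList timed_changes
  let all_times := PySem.List.sorted d.keys (fun x => x) false
  match PySem.List.max? all_times (fun x => x) with
  | none => []    -- Python: max([]) raises ValueError; excluded by Pre_
  | some max_time =>
    let targets := (PySem.List.pyRange 1 (PySem.Int.floordiv max_time interval + 1) 1).map (fun n => n * interval)
    let state := symbols.foldl (fun st p => st.insert p.1 "X") PySem.Dict.empty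
    pvALoop symbols d targets state all_times

-- ===== PORT B =====
-- B's inner 'for et in all_times: if et > t: break; …' — fresh scan, stops at the first later event
def pvScan (tc : PySem.Dict Int (List (String × String))) (t : Int) :
    PySem.Dict String String → List Int → PySem.Dict String String
  | st, [] => st
  | st, e :: rest => if e > t then st else pvScan tc t (pvApply tc st e) rest

def build_state_at_times_alt (symbols : List (String × String)) (timed_changes : List (Int × List (String × String))) (interval : Int) : List (Int × String) :=
  let d := PySem.Dict.ofList timed_changes
  let all_times := PySem.List.sorted d.keys (fun x => x) false
  match PySem.List.max? all_times (fun x => x) with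
  | none => []    -- Python: max([]) raises ValueError; excluded by Pre_
  | some max_time =>
    let state0 := symbols.foldl (fun st p => st.insert p.1 "X") PySem.Dict.empty
    (PySem.List.pyRange 1 (PySem.Int.floordiv max_time interval + 1) 1).map
      (fun n => (n * interval, pvRow symbols (pvScan d (n * interval) state0 all_times)))

-- ===== PRECONDITION & SPEC =====
-- Pre_ excludes exactly the inputs where the Python A raises: empty timed_changes
-- (max() of an empty sequence, ValueError) and interval = 0 (ZeroDivisionError in '//').
def Pre_build_state_at_times (symbols : List (String × String)) (timed_changes : List (Int × List (String × String))) (interval : Int) : Prop :=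
  timed_changes ≠ [] ∧ interval ≠ 0
instance (symbols : List (String × String)) (timed_changes : List (Int × List (String × String))) (interval : Int) : Decidable (Pre_build_state_at_times symbols timed_changes interval) := by unfold Pre_build_state_at_times; infer_instance

def pvWitness_build_state_at_times : (List (String × String)) × (List (Int × List (String × String))) × Int :=
  ([("a", "wire")], [((1 : Int), [("a", "1")])], 1)

def Spec_build_state_at_times (symbols : List (String × String)) (timed_changes : List (Int × List (String × String))) (interval : Int) (out : List (Int × String)) : Prop := out = build_state_at_times_alt symbols timed_changes interval
instance (symbols : List (String × String)) (timed_changes : List (Int × List (String × String))) (interval : Int) (out : List (Int × String)) : Decidable (Spec_build_state_at_times symbols timed_changes interval out) := by unfold Spec_build_state_at_times; infer_instance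

-- ===== CLAIM (what is proved, stated in full; the proofs are below) =====
def Claim_equal_build_state_at_times : Prop := ∀ (symbols : List (String × String)) (timed_changes : List (Int × List (String × String))) (interval : Int), Dom_build_state_at_times symbols timed_changes interval → Pre_build_state_at_times symbols timed_changes interval → Spec_build_state_at_times symbols timed_changes interval (build_state_at_times symbols timed_changes interval)

-- ===== LEMMAS AND PROOFS =====

-- the state component of A's while loop is exactly B's scan
theorem pvConsume_fst (tc : PySem.Dict Int (List (String × String))) (t : Int) :
    ∀ (rem : List Int) (st : PySem.Dict String String),
      (pvConsume tc t st rem).1 = pvScan tc t st rem := by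
  intro rem
  induction rem with
  | nil => intro st; rfl
  | cons e rest ih =>
    intro st
    simp only [pvConsume, pvScan]
    by_cases h : e ≤ t
    · simp [h, not_lt.mpr h, ih]
    · simp [h, not_le.mp h]

-- resuming the scan at a later target from A's suspended state gives B's fresh scan
theorem pvConsume_resume (tc : PySem.Dict Int (List (String × String))) (t u : Int) (htu : t ≤ u) :
    ∀ (rem : List Int) (st : PySem.Dict String String),
      pvScan tc u (pvConsume tc t st rem).1 (pvConsume tc t st rem).2 = pvScan tc u st rem := by
  intro rem
  induction rem with
  | nil => intro st; rfl
  | cons e rest ih =>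
    intro st
    simp only [pvConsume]
    by_cases h : e ≤ t
    · simp only [if_pos h]
      rw [ih]
      simp [pvScan, not_lt.mpr (le_trans h htu)]
    · simp [pvScan, h]

-- with no events left, A's loop emits the frozen row at every remaining target
theorem pvALoop_nil (symbols : List (String × String)) (tc : PySem.Dict Int (List (String × String))) :
    ∀ (ts : List Int) (st : PySem.Dict String String),
      pvALoop symbols tc ts st [] = ts.map (fun t => (t, pvRow symbols st)) := by
  intro ts
  induction ts with
  | nil => intro st; rfl
  | cons t ts ih => intro st; simp [pvALoop, pvConsume, ih]

-- when every event is ≤ t the whole list is consumed / scanned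
theorem pvConsume_all (tc : PySem.Dict Int (List (String × String))) (t : Int) :
    ∀ (rem : List Int) (st : PySem.Dict String String), (∀ e ∈ rem, e ≤ t) →
      pvConsume tc t st rem = (rem.foldl (pvApply tc) st, []) := by
  intro rem
  induction rem with
  | nil => intro st _; rfl
  | cons e rest ih =>
    intro st h
    simp only [pvConsume, if_pos (h e (List.mem_cons_self))]
    exact ih _ (fun x hx => h x (List.mem_cons_of_mem _ hx)) ▸ by
      simp [ih _ (fun x hx => h x (List.mem_cons_of_mem _ hx))]

theorem pvScan_all (tc : PySem.Dict Int (List (String × String))) (t : Int)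
    (rem : List Int) (st : PySem.Dict String String) (h : ∀ e ∈ rem, e ≤ t) :
    pvScan tc t st rem = rem.foldl (pvApply tc) st := by
  have := pvConsume_fst tc t rem st
  rw [pvConsume_all tc t rem st h] at this
  exact this.symm

-- MAIN LOOP LEMMA, increasing targets: A's sweep equals B's per-target fresh scans
theorem pvALoop_eq_map_of_pairwise (symbols : List (String × String)) (tc : PySem.Dict Int (List (String × String))) :
    ∀ (ts : List Int), ts.Pairwise (· ≤ ·) →
      ∀ (st : PySem.Dict String String) (rem : List Int),
        pvALoop symbols tc ts st rem = ts.map (fun t => (t, pvRow symbols (pvScan tc t st rem))) := by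
  intro ts
  induction ts with
  | nil => intro _ st rem; rfl
  | cons t ts ih =>
    intro hp st rem
    rcases List.pairwise_cons.mp hp with ⟨hle, hp'⟩
    simp only [pvALoop, List.map_cons]
    congr 1
    · rw [pvConsume_fst]
    · rw [ih hp']
      apply List.map_congr_left
      intro u hu
      rw [pvConsume_resume tc t u (hle u hu)]

-- MAIN LOOP LEMMA, every event ≤ every target (the negative-interval shape): both sides
-- apply all events at every target
theorem pvALoop_eq_map_of_all_le (symbols : List (String × String)) (tc : PySem.Dict Int (List (String × String))) :
    ∀ (ts : List Int) (st : PySem.Dict String String) (rem : List Int),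
      (∀ t ∈ ts, ∀ e ∈ rem, e ≤ t) →
        pvALoop symbols tc ts st rem = ts.map (fun t => (t, pvRow symbols (pvScan tc t st rem))) := by
  intro ts
  induction ts with
  | nil => intro st rem _; rfl
  | cons t ts ih =>
    intro st rem h
    have ht : ∀ e ∈ rem, e ≤ t := h t (List.mem_cons_self)
    simp only [pvALoop, pvConsume_all tc t rem st ht, List.map_cons]
    congr 1
    · rw [pvScan_all tc t rem st ht]
    · rw [pvALoop_nil]
      apply List.map_congr_left
      intro u hu
      rw [pvScan_all tc u rem st (h u (List.mem_cons_of_mem _ hu))]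

-- targets are nondecreasing for a positive interval
theorem pv_targets_pairwise (K interval : Int) (hiv : 0 < interval) :
    ((PySem.List.pyRange 1 K 1).map (fun n => n * interval)).Pairwise (· ≤ ·) := by
  refine List.Pairwise.map _ ?_ (PySem.List.pairwise_lt_pyRange_one 1 K)
  intro a b hab
  exact mul_le_mul_of_nonneg_right (le_of_lt hab) (le_of_lt hiv)

-- ===== VERDICT (by name: the statement is the Claim_ definition above) =====
theorem build_state_at_times_spec : Claim_equal_build_state_at_times := by
  intro symbols timed_changes interval _ hpre
  unfold Spec_build_state_at_times
  rcases hpre with ⟨-, hiv⟩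
  simp only [build_state_at_times, build_state_at_times_alt]
  cases hmax : PySem.List.max? (PySem.List.sorted (PySem.Dict.ofList timed_changes).keys (fun x => x) false) (fun x => x) with
  | none => rfl
  | some max_time =>
    dsimp only
    rcases lt_or_gt_of_ne hiv with hneg | hpos
    · rw [pvALoop_eq_map_of_all_le, List.map_map]
      · rfl
      intro t ht e he
      rcases List.mem_map.mp ht with ⟨n, hn, rfl⟩
      rcases (PySem.List.mem_pyRange_one).mp hn with ⟨hn1, hn2⟩
      have hemax : e ≤ max_time := by
        have := PySem.List.max?_isMax hmax e (by
          rw [PySem.List.mem_sorted] at he ⊢; exact he)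
        exact this
      have hK : PySem.Int.floordiv max_time interval * interval + PySem.Int.mod max_time interval = max_time :=
        PySem.Int.floordiv_mul_add_mod max_time interval
      have hmod := PySem.Int.mod_neg_bounds max_time hneg
      have hnK : n ≤ PySem.Int.floordiv max_time interval := by omega
      have hmul : PySem.Int.floordiv max_time interval * interval ≤ n * interval :=
        mul_le_mul_of_nonpos_right hnK (le_of_lt hneg)
      omega
    · rw [pvALoop_eq_map_of_pairwise symbols _ _ (pv_targets_pairwise _ interval hpos), List.map_map]
      rfl
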